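-- pv_equiv track=rewrite | github.com/captainpainway/project_euler_100 | problem_5/problem_5.py | smallest_multiple_factors
-- ===== SOURCE A (Python) =====
-- from functools import reduce
--
-- def sieve_of_eratosthenes(n):
--     arr = list(range(2, n))
--     next_prime = 0
--     while next_prime < len(arr) / 2:
--         for x in arr:
--             if x != None and x > next_prime:
--                 next_prime = x
--                 break
--         prime_idx = arr.index(next_prime)
--         for i in range(prime_idx + next_prime, len(arr), next_prime):
--             arr[i] = None
--     return [a for a in arr if a]
--
-- def smallest_multiple_factors(n):
--     powers = []
--     primes = sieve_of_eratosthenes(n)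
--     for x in primes:
--         i = 1
--         while x ** i < n:
--             i += 1
--         powers.append(i - 1)
--     return reduce(lambda a, b: a * b, [y ** powers[x] for x, y in enumerate(primes)])
-- ===== SOURCE B (Python) =====
-- def smallest_multiple_factors(n):
--     result = 1
--     for p in range(2, n):
--         d = 2
--         while d * d <= p and p % d:
--             d += 1
--         if d * d > p:  # no divisor d with 2 <= d*d <= p: p is prime
--             pk = p
--             while pk * p < n:
--                 pk *= p
--             result *= pk
--     return result
-- ===== Notes on version B (the rewrite author's own statement) =====
-- stated objective: faster
-- what changed: Replaces the Option-marking sieve with its repeated linear scans (find-next-prime scan, list.index, per-prime exponent powering, reduce over an enumerate-indexed list) by a single pass over 2..n-1 that tests primality by trial division up to sqrt(p) and multiplies the largest power of each prime below n into a running product.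
-- outside the precondition, e.g. on smallest_multiple_factors(2): A raises TypeError, B returns 1
import Mathlib
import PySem

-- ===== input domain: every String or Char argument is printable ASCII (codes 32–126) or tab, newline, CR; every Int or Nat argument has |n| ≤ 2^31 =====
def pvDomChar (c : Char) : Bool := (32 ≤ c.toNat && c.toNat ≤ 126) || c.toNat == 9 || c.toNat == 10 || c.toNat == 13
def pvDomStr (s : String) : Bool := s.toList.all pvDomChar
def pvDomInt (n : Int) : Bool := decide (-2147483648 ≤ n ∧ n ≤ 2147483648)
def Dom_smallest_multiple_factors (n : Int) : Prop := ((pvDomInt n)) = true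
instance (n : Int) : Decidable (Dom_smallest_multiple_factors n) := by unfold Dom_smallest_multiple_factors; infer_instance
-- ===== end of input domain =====

-- B replaces A's Option-marking sieve (with its find-next-prime scans, list.index and reduce)
-- by one pass with trial division up to sqrt(p), accumulating the largest power of each prime;
-- measurably faster. A raises TypeError for n ≤ 2 (reduce of an empty list): excluded by Pre_.

-- ===== PORT A =====
-- inner marking loop: 'for i in range(prime_idx + next_prime, len(arr), next_prime): arr[i] = None'
def pvMarkA (arr : List (Option Int)) (start step : Int) : List (Option Int) :=
  (PySem.List.pyRange start (arr.length : Int) step).foldl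
    (fun a i => PySem.List.pySetD a i none) arr

-- 'while next_prime < len(arr) / 2: …'; fuel arr.length+1 suffices (next_prime strictly
-- increases each iteration; proved below), so inside Pre_ the fuel-out branch is never taken.
-- The 'none' find-branch is where Python's arr.index would raise/loop; unreachable for n ≥ 3.
def pvSieveLoopA : Nat → List (Option Int) → Int → List (Option Int)
  | 0, arr, _ => arr
  | fuel+1, arr, np =>
    if 2 * np < (arr.length : Int) then      -- next_prime < len(arr)/2
      match arr.find? (fun o => match o with | some v => decide (np < v) | none => false) with
      | some o =>
        let np' := o.getD 0
        let pidx : Nat := (PySem.List.index? arr o).getD 0   -- arr.index(next_prime); present here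
        pvSieveLoopA fuel (pvMarkA arr ((pidx : Int) + np') np') np'
      | none => arr
    else arr

-- sieve_of_eratosthenes(n); entries are None or ints ≥ 2, so '[a for a in arr if a]' keeps
-- exactly the non-None entries
def pvSieveA (n : Int) : List Int :=
  let arr := (PySem.List.pyRange 2 n 1).map some
  (pvSieveLoopA (arr.length + 1) arr 0).filterMap id

-- 'i = 1; while x ** i < n: i += 1; … i - 1'; fuel 64 suffices under Dom (|n| ≤ 2^31, x ≥ 2)
def pvExpLoopA (x n : Int) : Nat → Int → Int
  | 0, i => i - 1
  | fuel+1, i => if x ^ i.toNat < n then pvExpLoopA x n fuel (i + 1) else i - 1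

def smallest_multiple_factors (n : Int) : Int :=
  let primes := pvSieveA n
  let powers := primes.foldl (fun acc x => acc ++ [pvExpLoopA x n 64 1]) ([] : List Int)
  let terms := (PySem.List.enumerate primes 0).map
    (fun xy => xy.2 ^ (PySem.List.pyGetD powers xy.1 0).toNat)
  match terms with
  | [] => 0            -- Python: reduce raises TypeError on the empty list; excluded by Pre_
  | t :: ts => ts.foldl (· * ·) t

-- ===== PORT B =====
-- 'd = 2; while d * d <= p and p % d: d += 1'
def pvTrialB (p d : Int) : Int :=
  if h : d * d ≤ p ∧ PySem.Int.mod p d ≠ 0 then pvTrialB p (d + 1) else d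
termination_by (p - d).toNat
decreasing_by
  rcases h with ⟨h1, h2⟩
  have hd : d < p := by
    have hp0 : 0 ≤ p := le_trans (mul_self_nonneg d) h1
    rcases le_or_gt 2 d with h2d | hlt
    · nlinarith
    · rcases lt_trichotomy d 0 with hneg | h0 | hpos
      · omega
      · subst h0
        have hm : PySem.Int.mod p 0 = p := by simp [PySem.Int.mod]
        rw [hm] at h2
        omega
      · have hd1 : d = 1 := by omega
        subst hd1
        have ha := PySem.Int.mod_nonneg p (b := 1) (by norm_num)
        have hb := PySem.Int.mod_lt p (b := 1) (by norm_num)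
        omega
  omega

-- 'pk = p; while pk * p < n: pk *= p'; fuel 64 suffices under Dom (|n| ≤ 2^31, p ≥ 2)
def pvPowB (p n : Int) : Nat → Int → Int
  | 0, pk => pk
  | fuel+1, pk => if pk * p < n then pvPowB p n fuel (pk * p) else pk

def smallest_multiple_factors_alt (n : Int) : Int :=
  (PySem.List.pyRange 2 n 1).foldl
    (fun result p =>
      let d := pvTrialB p 2
      if p < d * d then result * pvPowB p n 64 p else result)
    1

-- ===== PRECONDITION & SPEC =====
-- For n ≤ 2 the primes list is empty and A's reduce raises TypeError; those n are excluded.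
def Pre_smallest_multiple_factors (n : Int) : Prop := 3 ≤ n
instance (n : Int) : Decidable (Pre_smallest_multiple_factors n) := by
  unfold Pre_smallest_multiple_factors; infer_instance
def pvWitness_smallest_multiple_factors : Int := 10

def Spec_smallest_multiple_factors (n : Int) (out : Int) : Prop := out = smallest_multiple_factors_alt n
instance (n : Int) (out : Int) : Decidable (Spec_smallest_multiple_factors n out) := by
  unfold Spec_smallest_multiple_factors; infer_instance

-- ===== CLAIM (what is proved, stated in full; the proofs are below) =====
def Claim_equal_smallest_multiple_factors : Prop :=
  ∀ (n : Int), Dom_smallest_multiple_factors n → Pre_smallest_multiple_factors n →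
    Spec_smallest_multiple_factors n (smallest_multiple_factors n)

-- ===== LEMMAS AND PROOFS =====

-- ---------- power loops: A's exponent search and B's direct powering agree ----------

theorem pvPow_sync (x n : Int) : ∀ (fuel : Nat) (i : Int), 1 ≤ i →
    x ^ ((pvExpLoopA x n fuel i).toNat) = pvPowB x n fuel (x ^ ((i - 1).toNat)) := by
  intro fuel
  induction fuel with
  | zero => intro i hi; simp [pvExpLoopA, pvPowB]
  | succ f ih =>
    intro i hi
    have hpow : x ^ ((i - 1).toNat) * x = x ^ i.toNat := by
      rw [← pow_succ]
      congr 1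
      omega
    simp only [pvExpLoopA, pvPowB, hpow]
    split_ifs with h
    · have h2 := ih (i + 1) (by omega)
      simpa [show i + 1 - 1 = i from by ring] using h2
    · rfl

theorem pvPowB_fuel_irrel (x n : Int) (hx : 2 ≤ x) :
    ∀ (f1 f2 m : Nat) (pk : Int), 2 ^ m ≤ pk →
      n ≤ 2 ^ (m + f1 + 1) → n ≤ 2 ^ (m + f2 + 1) →
      pvPowB x n f1 pk = pvPowB x n f2 pk := by
  have stop : ∀ (m : Nat) (pk : Int), 2 ^ m ≤ pk → n ≤ 2 ^ (m + 1) →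
      ∀ f, pvPowB x n f pk = pk := by
    intro m pk hpk hn f
    cases f with
    | zero => rfl
    | succ f =>
      have hbig : (2 : Int) ^ (m + 1) ≤ pk * x := by
        have h0 : (0 : Int) ≤ 2 ^ m := by positivity
        calc (2 : Int) ^ (m + 1) = 2 ^ m * 2 := by ring
        _ ≤ pk * x := mul_le_mul hpk hx (by norm_num) (le_trans h0 hpk)
      simp only [pvPowB]
      rw [if_neg (by omega)]
  intro f1
  induction f1 with
  | zero =>
    intro f2 m pk hpk h1 h2
    exact (stop m pk hpk (by simpa using h1) f2).symm
  | succ f1 ih =>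
    intro f2 m pk hpk h1 h2
    cases f2 with
    | zero => exact stop m pk hpk (by simpa using h2) (f1 + 1)
    | succ f2 =>
      simp only [pvPowB]
      split_ifs with h
      · have hbig : (2 : Int) ^ (m + 1) ≤ pk * x := by
          have h0 : (0 : Int) ≤ 2 ^ m := by positivity
          calc (2 : Int) ^ (m + 1) = 2 ^ m * 2 := by ring
          _ ≤ pk * x := mul_le_mul hpk hx (by norm_num) (le_trans h0 hpk)
        exact ih f2 (m + 1) (pk * x) hbig
          (by rw [show m + 1 + f1 + 1 = m + (f1 + 1) + 1 from by omega]; exact h1)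
          (by rw [show m + 1 + f2 + 1 = m + (f2 + 1) + 1 from by omega]; exact h2)
      · rfl

theorem pvTerm_eq (n x : Int) (hx : 2 ≤ x) (hxn : x < n) (hn : n ≤ 2147483648) :
    x ^ ((pvExpLoopA x n 64 1).toNat) = pvPowB x n 64 x := by
  have h0 : pvExpLoopA x n 64 1
      = if x ^ ((1 : Int)).toNat < n then pvExpLoopA x n 63 (1 + 1) else 1 - 1 := rfl
  have h1 : pvExpLoopA x n 64 1 = pvExpLoopA x n 63 2 := by
    rw [h0, if_pos (by simpa using hxn)]
    norm_num
  rw [h1]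
  have h2 := pvPow_sync x n 63 2 (by norm_num)
  rw [h2]
  have h3 : x ^ (((2 : Int) - 1).toNat) = x := by norm_num
  rw [h3]
  exact pvPowB_fuel_irrel x n hx 63 64 1 x (by omega)
    (by have : (2147483648 : Int) ≤ 2 ^ (1 + 63 + 1) := by norm_num
        omega)
    (by have : (2147483648 : Int) ≤ 2 ^ (1 + 64 + 1) := by norm_num
        omega)

-- ---------- trial division: B's inner loop decides primality ----------

theorem pvTrialB_of_prime (p : Int) (hp : Nat.Prime p.toNat) (hp2 : 2 ≤ p) :
    ∀ (d : Int), 2 ≤ d → p < pvTrialB p d * pvTrialB p d := by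
  have hpn : ((p.toNat : Int)) = p := Int.toNat_of_nonneg (by omega)
  intro d
  induction d using pvTrialB.induct p with
  | case1 d h ih =>
    intro hd
    rw [pvTrialB, dif_pos h]
    exact ih (by omega)
  | case2 d h =>
    intro hd
    rw [pvTrialB, dif_neg h]
    by_cases hdd : d * d ≤ p
    · exfalso
      have hmod : PySem.Int.mod p d = 0 := by
        by_contra hm
        exact h ⟨hdd, hm⟩
      have hdvd : d ∣ p := (PySem.Int.mod_eq_zero_iff_dvd p d).mp hmod
      have hdp : d < p := by nlinarith
      have hnd : d.toNat ∣ p.toNat := by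
        have h1 : ((d.toNat : Int)) = d := Int.toNat_of_nonneg (by omega)
        rw [← hpn, ← h1] at hdvd
        exact_mod_cast hdvd
      rcases hp.eq_one_or_self_of_dvd d.toNat hnd with h1 | h1 <;> omega
    · omega

theorem pvTrialB_of_not_prime (p : Int) (hp2 : 2 ≤ p) (hp : ¬ Nat.Prime p.toNat) :
    pvTrialB p 2 * pvTrialB p 2 ≤ p := by
  have hpn : ((p.toNat : Int)) = p := Int.toNat_of_nonneg (by omega)
  have hne1 : p.toNat ≠ 1 := by omega
  have hqp : Nat.Prime p.toNat.minFac := Nat.minFac_prime hne1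
  have hq2 : 2 ≤ p.toNat.minFac := hqp.two_le
  have hqsq : p.toNat.minFac * p.toNat.minFac ≤ p.toNat := by
    have := Nat.minFac_sq_le_self (n := p.toNat) (by omega) hp
    nlinarith [this]
  have hqsqI : ((p.toNat.minFac : Int)) * ((p.toNat.minFac : Int)) ≤ p := by
    rw [← hpn]; exact_mod_cast hqsq
  have hreach : ∀ (d : Int), 2 ≤ d → d ≤ ((p.toNat.minFac : Int)) →
      pvTrialB p d = ((p.toNat.minFac : Int)) := by
    intro d
    induction d using pvTrialB.induct p with
    | case1 d h ih =>
      intro hd hdq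
      rcases eq_or_lt_of_le hdq with heq | hlt
      · exfalso
        have hdvd : d ∣ p := by
          rw [heq, ← hpn]
          exact_mod_cast Nat.minFac_dvd p.toNat
        exact h.2 ((PySem.Int.mod_eq_zero_iff_dvd p d).mpr hdvd)
      · rw [pvTrialB, dif_pos h]
        exact ih (by omega) (by omega)
    | case2 d h =>
      intro hd hdq
      rw [pvTrialB, dif_neg h]
      by_cases hdd : d * d ≤ p
      · have hmod : PySem.Int.mod p d = 0 := by
          by_contra hm
          exact h ⟨hdd, hm⟩
        have hdvd : d ∣ p := (PySem.Int.mod_eq_zero_iff_dvd p d).mp hmod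
        have hnd : d.toNat ∣ p.toNat := by
          have h1 : ((d.toNat : Int)) = d := Int.toNat_of_nonneg (by omega)
          rw [← hpn, ← h1] at hdvd
          exact_mod_cast hdvd
        have := Nat.minFac_le_of_dvd (by omega) hnd
        omega
      · exfalso
        have : d * d ≤ ((p.toNat.minFac : Int)) * ((p.toNat.minFac : Int)) :=
          mul_le_mul hdq hdq (by omega) (by positivity)
        omega
  rw [hreach 2 le_rfl (by exact_mod_cast hq2)]
  exact hqsqI

theorem pvTrialB_prime_iff (p : Int) (hp2 : 2 ≤ p) :
    (p < pvTrialB p 2 * pvTrialB p 2) ↔ Nat.Prime p.toNat := by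
  constructor
  · intro h
    by_contra hnp
    exact absurd h (not_lt.mpr (pvTrialB_of_not_prime p hp2 hnp))
  · intro h
    exact pvTrialB_of_prime p h hp2 2 le_rfl

-- ---------- list plumbing ----------

theorem pvFoldlMul (t : Int) (ts : List Int) : ts.foldl (· * ·) t = (t :: ts).prod := by
  induction ts generalizing t with
  | nil => simp
  | cons a ts ih =>
    simp only [List.foldl_cons]
    rw [ih]
    simp [List.prod_cons, mul_assoc]

theorem pvFoldlIfProd (l : List Int) (c : Int → Prop) [DecidablePred c] (g : Int → Int) :
    ∀ (init : Int),
      l.foldl (fun r p => if c p then r * g p else r) init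
        = init * ((l.filter (fun p => decide (c p))).map g).prod := by
  induction l with
  | nil => simp
  | cons p l ih =>
    intro init
    by_cases h : c p
    · simp [h, ih, List.prod_cons, mul_assoc]
    · simp [h, ih]

theorem pvFilterMapIf (l : List Int) (c : Int → Prop) [DecidablePred c] :
    l.filterMap (fun v => if c v then some v else none) = l.filter (fun v => decide (c v)) := by
  induction l with
  | nil => rfl
  | cons a l ih =>
    by_cases h : c a
    · simp [h, ih]
    · simp [h, ih]

theorem pvTermsMap (xs : List Int) (f : Int → Int) :
    (PySem.List.enumerate xs 0).map
        (fun q => q.2 ^ (PySem.List.pyGetD (xs.map f) q.1 0).toNat)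
      = xs.map (fun y => y ^ (f y).toNat) := by
  apply List.ext_getElem
  · simp [PySem.List.length_enumerate]
  · intro k h1 h2
    simp only [List.getElem_map, PySem.List.getElem_enumerate, zero_add]
    have hk : k < xs.length := by simpa using h2
    have : PySem.List.pyGetD (xs.map f) (k : Int) 0 = f xs[k] := by
      rw [PySem.List.pyGetD_natCast]
      rw [List.getD_eq_getElem (xs.map f) 0 (by simpa using hk)]
      simp
    rw [this]

-- ---------- the sieve: invariant and correctness ----------

def pvMarked (np v : Int) : Prop :=
  ∃ q : Int, 2 ≤ q ∧ q ≤ np ∧ Nat.Prime q.toNat ∧ q ∣ v ∧ q < v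

def pvInv (n np : Int) (arr : List (Option Int)) : Prop :=
  arr.length = (n - 2).toNat ∧
  ∀ (k : Nat) (hk : k < arr.length),
    (pvMarked np ((k : Int) + 2) → arr[k] = none) ∧
    (¬ pvMarked np ((k : Int) + 2) → arr[k] = some ((k : Int) + 2))

theorem pvFoldlSet_length (ids : List Int) :
    ∀ (arr : List (Option Int)),
      (ids.foldl (fun a i => PySem.List.pySetD a i none) arr).length = arr.length := by
  induction ids with
  | nil => intro arr; rfl
  | cons i ids ih =>
    intro arr
    simp only [List.foldl_cons]
    rw [ih]
    simp [PySem.List.length_pySetD]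

theorem pvMarkA_length (arr : List (Option Int)) (s t : Int) :
    (pvMarkA arr s t).length = arr.length := by
  unfold pvMarkA
  exact pvFoldlSet_length _ arr

theorem pvFoldlSet_getElem? (ids : List Int) :
    ∀ (arr : List (Option Int)) (k : Nat), (∀ i ∈ ids, 0 ≤ i) →
      (ids.foldl (fun a i => PySem.List.pySetD a i none) arr)[k]? =
        if (k : Int) ∈ ids then (if k < arr.length then some none else none) else arr[k]? := by
  induction ids with
  | nil => intro arr k _; simp
  | cons i ids ih =>
    intro arr k hpos
    have hi : 0 ≤ i := hpos i (List.mem_cons_self ..)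
    simp only [List.foldl_cons, List.mem_cons]
    rw [PySem.List.pySetD_of_nonneg _ _ hi]
    rw [ih _ k (fun j hj => hpos j (List.mem_cons_of_mem _ hj))]
    by_cases hk : (k : Int) = i
    · have hkt : i.toNat = k := by omega
      subst hkt
      by_cases hlen : i.toNat < arr.length
      · simp [hk, hlen]
      · simp [hk, hlen, List.length_set]
    · have hne : i.toNat ≠ k := by omega
      by_cases hmem : (k : Int) ∈ ids
      · simp [hk, hmem, List.length_set]
      · simp only [hk, hmem, or_self, if_false]
        rw [List.getElem?_set]
        simp [hne]

theorem pvInv_init (n : Int) (hn : 3 ≤ n) :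
    pvInv n 0 ((PySem.List.pyRange 2 n 1).map some) := by
  constructor
  · simp [PySem.List.length_pyRange_one]
  · intro k hk
    have hk' : k < (PySem.List.pyRange 2 n).length := by simpa using hk
    constructor
    · rintro ⟨q, hq2, hq0, -⟩
      omega
    · intro _
      simp only [List.getElem_map, PySem.List.getElem_pyRange_one]
      congr 1
      omega

theorem pvPrime_not_marked (np v : Int) (hv : Nat.Prime v.toNat) (hv0 : 2 ≤ v) :
    ¬ pvMarked np v := by
  rintro ⟨q, hq2, hqle, hqp, hqdvd, hqlt⟩
  have hq0 : ((q.toNat : Int)) = q := Int.toNat_of_nonneg (by omega)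
  have hv0' : ((v.toNat : Int)) = v := Int.toNat_of_nonneg (by omega)
  have hnd : q.toNat ∣ v.toNat := by
    rw [← hq0, ← hv0'] at hqdvd
    exact_mod_cast hqdvd
  rcases hv.eq_one_or_self_of_dvd q.toNat hnd with h | h <;> omega

theorem pvMinFac_facts (v : Int) (hv : 2 ≤ v) (hnp : ¬ Nat.Prime v.toNat) :
    ∃ q : Int, 2 ≤ q ∧ Nat.Prime q.toNat ∧ q ∣ v ∧ q < v ∧ q * q ≤ v := by
  have hv0 : ((v.toNat : Int)) = v := Int.toNat_of_nonneg (by omega)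
  have hne1 : v.toNat ≠ 1 := by omega
  have hqp : Nat.Prime v.toNat.minFac := Nat.minFac_prime hne1
  have hq2 : 2 ≤ v.toNat.minFac := hqp.two_le
  have hqsq : v.toNat.minFac * v.toNat.minFac ≤ v.toNat := by
    have := Nat.minFac_sq_le_self (n := v.toNat) (by omega) hnp
    nlinarith [this]
  refine ⟨(v.toNat.minFac : Int), by exact_mod_cast hq2, by simp [hqp], ?_, ?_, ?_⟩
  · rw [← hv0]
    exact_mod_cast Nat.minFac_dvd v.toNat
  · have : (v.toNat.minFac : Int) * (v.toNat.minFac : Int) ≤ v := by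
      rw [← hv0]; exact_mod_cast hqsq
    nlinarith
  · rw [← hv0]; exact_mod_cast hqsq

theorem pvMark_inv (n np q₀ : Int) (arr : List (Option Int)) (hnp : 0 ≤ np)
    (hq02 : 2 ≤ q₀) (hq0gt : np < q₀) (hq0p : Nat.Prime q₀.toNat)
    (hleast : ∀ r : Int, np < r → r < q₀ → ¬ Nat.Prime r.toNat)
    (hinv : pvInv n np arr) :
    pvInv n q₀ (pvMarkA arr ((q₀ - 2) + q₀) q₀) := by
  obtain ⟨hlen, hitems⟩ := hinv
  refine ⟨by rw [pvMarkA_length]; exact hlen, ?_⟩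
  intro k hk
  have hk' : k < arr.length := by rwa [pvMarkA_length] at hk
  have hpos : ∀ i ∈ PySem.List.pyRange ((q₀ - 2) + q₀) (arr.length : Int) q₀, 0 ≤ i := by
    intro i hi
    have := (PySem.List.mem_pyRange_iff_of_pos (by omega) i).mp hi
    omega
  have hget := pvFoldlSet_getElem? (PySem.List.pyRange ((q₀ - 2) + q₀) (arr.length : Int) q₀)
    arr k hpos
  have hmemiff : ((k : Int) ∈ PySem.List.pyRange ((q₀ - 2) + q₀) (arr.length : Int) q₀) ↔
      (q₀ ∣ ((k : Int) + 2) ∧ 2 * q₀ ≤ (k : Int) + 2) := by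
    rw [PySem.List.mem_pyRange_iff_of_pos (by omega)]
    have h5 : q₀ ∣ 2 * q₀ := ⟨2, by ring⟩
    constructor
    · rintro ⟨h1, h2, h3⟩
      refine ⟨?_, by omega⟩
      have h4 : q₀ ∣ ((k : Int) + 2) - 2 * q₀ := by
        have heq : (k : Int) - ((q₀ - 2) + q₀) = ((k : Int) + 2) - 2 * q₀ := by ring
        rwa [heq] at h3
      have := dvd_add h4 h5
      simpa using this
    · rintro ⟨h1, h2⟩
      refine ⟨by omega, by omega, ?_⟩
      have := dvd_sub h1 h5
      have heq : ((k : Int) + 2) - 2 * q₀ = (k : Int) - ((q₀ - 2) + q₀) := by ring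
      rwa [heq] at this
  have hmupd : pvMarked q₀ ((k : Int) + 2) ↔
      (pvMarked np ((k : Int) + 2) ∨ (q₀ ∣ ((k : Int) + 2) ∧ 2 * q₀ ≤ (k : Int) + 2)) := by
    constructor
    · rintro ⟨q, hq2, hqle, hqp, hqdvd, hqlt⟩
      rcases eq_or_lt_of_le hqle with heq | hlt
      · right
        subst heq
        refine ⟨hqdvd, ?_⟩
        obtain ⟨m, hm⟩ := hqdvd
        have hm2 : 2 ≤ m := by nlinarith
        nlinarith
      · left
        rcases le_or_gt q np with hle | hgt
        · exact ⟨q, hq2, hle, hqp, hqdvd, hqlt⟩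
        · exact absurd hqp (hleast q hgt hlt)
    · rintro (⟨q, hq2, hqle, hrest⟩ | ⟨h1, h2⟩)
      · exact ⟨q, hq2, by omega, hrest⟩
      · exact ⟨q₀, hq02, le_rfl, hq0p, h1, by omega⟩
  have hunfold : pvMarkA arr ((q₀ - 2) + q₀) q₀ =
      (PySem.List.pyRange ((q₀ - 2) + q₀) (arr.length : Int) q₀).foldl
        (fun a i => PySem.List.pySetD a i none) arr := rfl
  constructor
  · intro hm
    rw [hmupd] at hm
    rw [List.getElem_eq_iff hk, hunfold, hget]
    by_cases hmem : (k : Int) ∈ PySem.List.pyRange ((q₀ - 2) + q₀) (arr.length : Int) q₀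
    · simp [hmem, hk']
    · have hmnp : pvMarked np ((k : Int) + 2) := by
        rcases hm with hmnp | hdiv
        · exact hmnp
        · exact absurd (hmemiff.mpr hdiv) hmem
      rw [if_neg hmem, List.getElem?_eq_getElem hk', (hitems k hk').1 hmnp]
  · intro hm
    rw [hmupd, not_or] at hm
    obtain ⟨hm1, hm2⟩ := hm
    have hmem : ¬ ((k : Int) ∈ PySem.List.pyRange ((q₀ - 2) + q₀) (arr.length : Int) q₀) :=
      fun h => hm2 (hmemiff.mp h)
    rw [List.getElem_eq_iff hk, hunfold, hget, if_neg hmem,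
      List.getElem?_eq_getElem hk', (hitems k hk').2 hm1]

theorem pvStep (n np : Int) (arr : List (Option Int)) (hn : 3 ≤ n) (hnp : 0 ≤ np)
    (hinv : pvInv n np arr) (hcond : 2 * np < (arr.length : Int)) :
    ∃ q₀ : Int, 2 ≤ q₀ ∧ np < q₀ ∧ q₀ < n ∧ Nat.Prime q₀.toNat ∧
      arr.find? (fun o => match o with | some v => decide (np < v) | none => false)
        = some (some q₀) ∧
      ((PySem.List.index? arr (some q₀)).getD 0 : Int) = q₀ - 2 ∧
      pvInv n q₀ (pvMarkA arr ((q₀ - 2) + q₀) q₀) := by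
  have hinv' := hinv
  obtain ⟨hlen, hitems⟩ := hinv
  have hlenI : ((arr.length : Nat) : Int) = n - 2 := by rw [hlen]; omega
  have hc2 : 2 * np < n - 2 := by omega
  have hex : ∃ qn : Nat, Nat.Prime qn ∧ np < (qn : Int) ∧ (qn : Int) < n := by
    rcases le_or_gt np 1 with h1 | h1
    · exact ⟨2, Nat.prime_two, by push_cast; omega, by push_cast; omega⟩
    · obtain ⟨P, hPp, hP1, hP2⟩ := Nat.exists_prime_lt_and_le_two_mul np.toNat (by omega)
      exact ⟨P, hPp, by omega, by omega⟩
  obtain ⟨hq0p, hq0gt, hq0lt⟩ := Nat.find_spec hex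
  set q0n := Nat.find hex with hq0ndef
  set q₀ : Int := (q0n : Int) with hq₀def
  have hq02 : 2 ≤ q₀ := by have := hq0p.two_le; omega
  have hq0pt : Nat.Prime q₀.toNat := by simpa using hq0p
  have hleastI : ∀ r : Int, np < r → r < q₀ → ¬ Nat.Prime r.toNat := by
    intro r h1 h2 hpr
    have hmin : ¬ (Nat.Prime r.toNat ∧ np < ((r.toNat : Nat) : Int) ∧ ((r.toNat : Nat) : Int) < n) :=
      Nat.find_min hex (by omega)
    exact hmin ⟨hpr, by omega, by omega⟩
  set k₀ : Nat := (q₀ - 2).toNat with hk₀def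
  have hk₀ : k₀ < arr.length := by omega
  have hk₀v : (k₀ : Int) + 2 = q₀ := by omega
  have hq0unm : ¬ pvMarked np q₀ := pvPrime_not_marked np q₀ hq0pt hq02
  have harrk₀ : arr[k₀] = some q₀ := by
    have h := (hitems k₀ hk₀).2 (by rwa [hk₀v])
    rwa [hk₀v] at h
  have hnohit : ∀ (j : Nat) (hj : j < k₀),
      ((fun o => match o with | some v => decide (np < v) | none => false)
        (arr[j]'(by omega))) = false := by
    intro j hj
    have hjlen : j < arr.length := by omega
    by_cases hmk : pvMarked np ((j : Int) + 2)
    · rw [(hitems j hjlen).1 hmk]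
    · rw [(hitems j hjlen).2 hmk]
      simp only [decide_eq_false_iff_not, not_lt]
      by_contra hlt'
      rw [not_le] at hlt'
      have hv2 : 2 ≤ (j : Int) + 2 := by omega
      have hvq : (j : Int) + 2 < q₀ := by omega
      by_cases hpr : Nat.Prime ((j : Int) + 2).toNat
      · exact hleastI ((j : Int) + 2) (by omega) hvq hpr
      · obtain ⟨q, hq2, hqp, hqdvd, hqlt, hqsq⟩ := pvMinFac_facts ((j : Int) + 2) hv2 hpr
        have hqnp : np < q := by
          by_contra hle
          exact hmk ⟨q, hq2, by omega, hqp, hqdvd, hqlt⟩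
        exact hleastI q hqnp (by omega) hqp
  have hfind : arr.find? (fun o => match o with | some v => decide (np < v) | none => false)
      = some (some q₀) := by
    rw [List.find?_eq_some_iff_getElem]
    refine ⟨by simpa using hq0gt, k₀, hk₀, harrk₀, ?_⟩
    intro j hj
    rw [Bool.not_eq_true']
    exact hnohit j hj
  have hidx : PySem.List.index? arr (some q₀) = some k₀ := by
    rw [PySem.List.index?_eq_some_iff]
    refine ⟨arr.take k₀, arr.drop (k₀ + 1), ?_, ?_, ?_⟩
    · conv_lhs => rw [← List.take_append_drop k₀ arr]
      congr 1
      rw [List.drop_eq_getElem_cons hk₀, harrk₀]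
    · simp only [List.length_take]
      omega
    · intro hmem
      obtain ⟨j, hj, heq⟩ := List.mem_iff_getElem.mp hmem
      have hjk : j < k₀ := by
        simp only [List.length_take] at hj
        omega
      have hje : (arr.take k₀)[j] = arr[j]'(by omega) := List.getElem_take
      rw [hje] at heq
      have hf := hnohit j hjk
      rw [heq] at hf
      simp only [decide_eq_false_iff_not, not_lt] at hf
      omega
  refine ⟨q₀, hq02, hq0gt, hq0lt, hq0pt, hfind, ?_, ?_⟩
  · rw [hidx]
    simp only [Option.getD_some]
    omega
  · exact pvMark_inv n np q₀ arr hnp hq02 hq0gt hq0pt hleastI hinv' 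

theorem pvLoop (n : Int) (hn : 3 ≤ n) :
    ∀ (fuel : Nat) (np : Int) (arr : List (Option Int)), 0 ≤ np → pvInv n np arr →
      (arr.length : Int) < 2 * np + 2 * fuel →
      ∃ np', 0 ≤ np' ∧ (n - 2) ≤ 2 * np' ∧ pvInv n np' (pvSieveLoopA fuel arr np) := by
  intro fuel
  induction fuel with
  | zero =>
    intro np arr h0 hinv hf
    refine ⟨np, h0, ?_, hinv⟩
    have : ((arr.length : Nat) : Int) = n - 2 := by rw [hinv.1]; omega
    omega
  | succ fuel ih =>
    intro np arr h0 hinv hf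
    by_cases hc : 2 * np < (arr.length : Int)
    · obtain ⟨q₀, hq02, hq0gt, hq0lt, hq0p, hfind, hidx, hinv'⟩ := pvStep n np arr hn h0 hinv hc
      have hred : pvSieveLoopA (fuel + 1) arr np
          = pvSieveLoopA fuel (pvMarkA arr ((q₀ - 2) + q₀) q₀) q₀ := by
        simp only [pvSieveLoopA]
        rw [if_pos hc, hfind]
        simp only [Option.getD_some]
        rw [hidx]
      rw [hred]
      apply ih q₀ (pvMarkA arr ((q₀ - 2) + q₀) q₀) (by omega) hinv'
      rw [pvMarkA_length]
      omega
    · refine ⟨np, h0, ?_, ?_⟩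
      · have : ((arr.length : Nat) : Int) = n - 2 := by rw [hinv.1]; omega
        omega
      · have hstop : pvSieveLoopA (fuel + 1) arr np = arr := by
          simp only [pvSieveLoopA]
          rw [if_neg hc]
        rw [hstop]
        exact hinv

theorem pvUnmarked_iff_prime (n np v : Int) (hn : 3 ≤ n) (hnp : 0 ≤ np)
    (hend : n - 2 ≤ 2 * np) (hv2 : 2 ≤ v) (hvn : v < n) :
    (¬ pvMarked np v) ↔ Nat.Prime v.toNat := by
  constructor
  · intro hunm
    by_contra hnpr
    obtain ⟨q, hq2, hqp, hqdvd, hqlt, hqsq⟩ := pvMinFac_facts v hv2 hnpr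
    refine hunm ⟨q, hq2, ?_, hqp, hqdvd, hqlt⟩
    by_contra hqnp
    have h1 : n ≤ 2 * q := by omega
    have h2 : 2 * q ≤ q * q := by nlinarith
    omega
  · intro hpr
    exact pvPrime_not_marked np v hpr hv2

theorem pvSieveA_eq (n : Int) (hn : 3 ≤ n) :
    pvSieveA n = (PySem.List.pyRange 2 n 1).filter (fun v => decide (Nat.Prime v.toNat)) := by
  unfold pvSieveA
  have hinv0 := pvInv_init n hn
  obtain ⟨np', h0, hend, hinv'⟩ := pvLoop n hn (((PySem.List.pyRange 2 n 1).map some).length + 1)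
    0 ((PySem.List.pyRange 2 n 1).map some) le_rfl hinv0 (by push_cast; omega)
  have hlen' : (pvSieveLoopA (((PySem.List.pyRange 2 n 1).map some).length + 1)
      ((PySem.List.pyRange 2 n 1).map some) 0).length = (n - 2).toNat := hinv'.1
  have harr : pvSieveLoopA (((PySem.List.pyRange 2 n 1).map some).length + 1)
        ((PySem.List.pyRange 2 n 1).map some) 0
      = (PySem.List.pyRange 2 n 1).map (fun v => if Nat.Prime v.toNat then some v else none) := by
    apply List.ext_getElem
    · rw [hlen']
      simp [PySem.List.length_pyRange_one]
    · intro k h1 h2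
      have hkI : (k : Int) + 2 < n := by
        rw [hlen'] at h1
        omega
      have hun := pvUnmarked_iff_prime n np' ((k : Int) + 2) hn h0 hend (by omega) hkI
      have hrhs : ((PySem.List.pyRange 2 n 1).map
          (fun v => if Nat.Prime v.toNat then some v else none))[k]'h2
          = if Nat.Prime ((k : Int) + 2).toNat then some ((k : Int) + 2) else none := by
        simp only [List.getElem_map, PySem.List.getElem_pyRange_one]
        rw [show (2 : Int) + (k : Int) = (k : Int) + 2 from by ring]
      rw [hrhs]
      by_cases hpr : Nat.Prime ((k : Int) + 2).toNat
      · rw [(hinv'.2 k h1).2 (hun.mpr hpr), if_pos hpr]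
      · have hm : pvMarked np' ((k : Int) + 2) := by
          by_contra hnm
          exact hpr (hun.mp hnm)
        rw [(hinv'.2 k h1).1 hm, if_neg hpr]
  simp only [harr, List.filterMap_map]
  simp only [Function.comp_def, id_eq]
  exact pvFilterMapIf (PySem.List.pyRange 2 n 1) (fun v => Nat.Prime v.toNat)

theorem pvTwo_mem (n : Int) (hn : 3 ≤ n) :
    (2 : Int) ∈ (PySem.List.pyRange 2 n 1).filter (fun v => decide (Nat.Prime v.toNat)) := by
  rw [List.mem_filter]
  constructor
  · rw [PySem.List.mem_pyRange_one]
    omega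
  · have h2 : ((2 : Int)).toNat = 2 := rfl
    simp [h2, Nat.prime_two]

-- ---------- assembling both sides ----------

theorem smallest_multiple_factors_main : ∀ (n : Int), Dom_smallest_multiple_factors n →
    Pre_smallest_multiple_factors n →
    smallest_multiple_factors n = smallest_multiple_factors_alt n := by
  intro n hd hn3
  have hn31 : n ≤ 2147483648 := by
    unfold Dom_smallest_multiple_factors pvDomInt at hd
    simp only [decide_eq_true_eq] at hd
    exact hd.2
  have hn3' : 3 ≤ n := hn3
  have hP := pvSieveA_eq n hn3'
  set P := (PySem.List.pyRange 2 n 1).filter (fun v => decide (Nat.Prime v.toNat)) with hPdef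
  have h2P : (2 : Int) ∈ P := pvTwo_mem n hn3'
  have hmem : ∀ y ∈ P, 2 ≤ y ∧ y < n := by
    intro y hy
    have := (List.mem_filter.mp hy).1
    exact PySem.List.mem_pyRange_one.mp this
  have hmapeq : P.map (fun y => y ^ ((pvExpLoopA y n 64 1)).toNat)
      = P.map (fun y => pvPowB y n 64 y) :=
    List.map_congr_left (fun y hy => pvTerm_eq n y (hmem y hy).1 (hmem y hy).2 hn31)
  obtain ⟨t, ts, hPe⟩ : ∃ t ts, P = t :: ts := by
    cases hq : P with
    | nil => rw [hq] at h2P; simp at h2P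
    | cons t ts => exact ⟨t, ts, rfl⟩
  have hcongr' : ∀ (acc : Int), ∀ p ∈ PySem.List.pyRange 2 n 1,
      (fun (result p : Int) =>
        let d := pvTrialB p 2
        if p < d * d then result * pvPowB p n 64 p else result) acc p
      = (fun (r p : Int) => if Nat.Prime p.toNat then r * pvPowB p n 64 p else r) acc p := by
    intro acc p hp'
    have h2p : 2 ≤ p := by
      have := PySem.List.mem_pyRange_one.mp hp'
      omega
    show (if p < pvTrialB p 2 * pvTrialB p 2 then acc * pvPowB p n 64 p else acc)
        = (if Nat.Prime p.toNat then acc * pvPowB p n 64 p else acc)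
    by_cases hpr : Nat.Prime p.toNat
    · rw [if_pos ((pvTrialB_prime_iff p h2p).mpr hpr), if_pos hpr]
    · rw [if_neg (fun hcon => hpr ((pvTrialB_prime_iff p h2p).mp hcon)), if_neg hpr]
  have hBside : smallest_multiple_factors_alt n
      = ((P.map (fun p => pvPowB p n 64 p))).prod := by
    unfold smallest_multiple_factors_alt
    rw [PySem.List.foldl_congr_mem (PySem.List.pyRange 2 n 1) _
      (fun (r p : Int) => if Nat.Prime p.toNat then r * pvPowB p n 64 p else r) 1 hcongr']
    rw [pvFoldlIfProd (PySem.List.pyRange 2 n 1) (fun p => Nat.Prime p.toNat)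
      (fun p => pvPowB p n 64 p) 1, one_mul]
  unfold smallest_multiple_factors
  rw [hP]
  simp only [PySem.List.foldl_append_singleton_eq_map, List.nil_append]
  simp only [pvTermsMap]
  simp only [hmapeq]
  rw [hBside]
  simp only [hPe, List.map_cons]
  show (List.map (fun y => pvPowB y n 64 y) ts).foldl (· * ·) (pvPowB t n 64 t)
      = (pvPowB t n 64 t :: List.map (fun y => pvPowB y n 64 y) ts).prod
  exact pvFoldlMul _ _

-- ===== VERDICT (by name: the statement is the Claim_ definition above) =====
theorem smallest_multiple_factors_spec : Claim_equal_smallest_multiple_factors := by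
  intro n hd hp
  exact smallest_multiple_factors_main n hd hp
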